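-- pv_equiv track=rewrite | github.com/jerjgeno/cf | cf.py | euclids_algorithm
-- ===== SOURCE A (Python) =====
-- def euclids_algorithm(n, m):
--     output = []
--     a = n
--     b = m
--     while True:
--         k = a//b
--         r = a%b
--         output.append([k,r])
--         if r==0: break
--         else:
--             a = b
--             b = r
--     return output
-- ===== SOURCE B (Python) =====
-- def euclids_algorithm(n, m):
--     k, r = divmod(n, m)
--     if r == 0:
--         return [[k, r]]
--     return [[k, r]] + euclids_algorithm(m, r)
-- ===== Notes on version B (the rewrite author's own statement) =====
-- stated objective: simpler
-- what changed: Replaces the while-loop that mutates (a,b) and appends into an output list with a direct textbook recursion that returns [[k,r]] concatenated with the recursive call on (m,r), no accumulator.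
import Mathlib
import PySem

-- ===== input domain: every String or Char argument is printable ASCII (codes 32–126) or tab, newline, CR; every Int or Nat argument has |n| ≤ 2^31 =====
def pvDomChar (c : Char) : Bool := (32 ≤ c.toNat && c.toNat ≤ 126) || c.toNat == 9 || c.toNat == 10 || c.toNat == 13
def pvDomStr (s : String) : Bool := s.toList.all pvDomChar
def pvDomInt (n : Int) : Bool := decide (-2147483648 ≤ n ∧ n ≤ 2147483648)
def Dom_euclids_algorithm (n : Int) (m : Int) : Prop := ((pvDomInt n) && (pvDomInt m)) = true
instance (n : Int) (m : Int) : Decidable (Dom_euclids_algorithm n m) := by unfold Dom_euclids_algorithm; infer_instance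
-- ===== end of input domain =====

-- B replaces A's accumulating while-loop by the direct textbook recursion returning
-- [[k,r]] ++ recursive call; objective: simpler. A = B on m ≠ 0 (both raise ZeroDivisionError at m = 0).

-- Python's % has |a % b| < |b| for b ≠ 0 (used for termination of both ports).
theorem pv_mod_natAbs_lt (a b : Int) (hb : b ≠ 0) : (PySem.Int.mod a b).natAbs < b.natAbs := by
  rcases lt_or_gt_of_ne hb with h | h
  · have h1 := PySem.Int.mod_neg_bounds a h
    omega
  · have h1 := PySem.Int.mod_nonneg a h
    have h2 := PySem.Int.mod_lt a h
    omega

-- ===== PORT A =====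
-- the while-loop over mutable a, b, output; the b = 0 guard only makes the recursion
-- total (Python raises ZeroDivisionError there, excluded by Pre_)
def euclidLoopA (a : Int) (b : Int) (output : List (List Int)) : List (List Int) :=
  if hb : b = 0 then output
  else
    let k := PySem.Int.floordiv a b
    let r := PySem.Int.mod a b
    let output' := output ++ [[k, r]]
    if r = 0 then output' else euclidLoopA b r output'
termination_by b.natAbs
decreasing_by exact pv_mod_natAbs_lt a b hb

def euclids_algorithm (n : Int) (m : Int) : List (List Int) :=
  euclidLoopA n m []

-- ===== PORT B =====
def euclids_algorithm_alt (n : Int) (m : Int) : List (List Int) :=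
  if hm : m = 0 then []   -- Python B raises ZeroDivisionError here (outside Pre_)
  else
    let k := PySem.Int.floordiv n m
    let r := PySem.Int.mod n m
    if r = 0 then [[k, r]] else [[k, r]] ++ euclids_algorithm_alt m r
termination_by m.natAbs
decreasing_by exact pv_mod_natAbs_lt n m hm

-- ===== PRECONDITION & SPEC =====
-- Pre_ excludes exactly m = 0, where both Pythons raise ZeroDivisionError.
def Pre_euclids_algorithm (n : Int) (m : Int) : Prop := m ≠ 0
instance (n : Int) (m : Int) : Decidable (Pre_euclids_algorithm n m) := by unfold Pre_euclids_algorithm; infer_instance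
def pvWitness_euclids_algorithm : Int × Int := (12, 5)

def Spec_euclids_algorithm (n : Int) (m : Int) (out : List (List Int)) : Prop := out = euclids_algorithm_alt n m
instance (n : Int) (m : Int) (out : List (List Int)) : Decidable (Spec_euclids_algorithm n m out) := by unfold Spec_euclids_algorithm; infer_instance

-- ===== CLAIM (what is proved, stated in full; the proofs are below) =====
def Claim_equal_euclids_algorithm : Prop := ∀ (n : Int) (m : Int), Dom_euclids_algorithm n m → Pre_euclids_algorithm n m → Spec_euclids_algorithm n m (euclids_algorithm n m)

-- ===== LEMMAS AND PROOFS =====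
theorem euclidLoopA_eq (N : Nat) : ∀ (b a : Int) (out : List (List Int)), b.natAbs ≤ N → b ≠ 0 →
    euclidLoopA a b out = out ++ euclids_algorithm_alt a b := by
  induction N with
  | zero => intro b a out h hb; omega
  | succ N ih =>
    intro b a out h hb
    rw [euclidLoopA, euclids_algorithm_alt, dif_neg hb, dif_neg hb]
    by_cases hr : PySem.Int.mod a b = 0
    · simp [hr]
    · simp only [if_neg hr]
      rw [ih (PySem.Int.mod a b) b _ (by have := pv_mod_natAbs_lt a b hb; omega) hr]
      simp

-- ===== VERDICT (by name: the statement is the Claim_ definition above) =====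
theorem euclids_algorithm_spec : Claim_equal_euclids_algorithm := by
  intro n m _ hm
  unfold Spec_euclids_algorithm euclids_algorithm
  rw [euclidLoopA_eq m.natAbs m n [] le_rfl hm]
  simp
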